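-- pv_equiv track=rewrite | github.com/jax-ml/jax | tests/mosaic/gpu_test.py | get_packed_shape
-- ===== SOURCE A (Python) =====
-- def get_packed_shape(strides, shape):
--   perm = sorted(range(len(strides)), key=lambda i: strides[i], reverse=True)
--   ordered_strides = [strides[i] for i in perm]
--   ordered_shape = [shape[i] for i in perm]
--   packed_shape = [ordered_shape[-1]]
--   packed_shape += [
--       stride0 // stride
--       for stride0, stride in zip(ordered_strides, ordered_strides[1:])
--   ]
--   # Invert permutation
--   inv_perm = [None] * len(perm)
--   for i, p in enumerate(perm):
--     inv_perm[p] = i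
--   return [packed_shape[i] for i in inv_perm]
-- ===== SOURCE B (Python) =====
-- def get_packed_shape(strides, shape):
--   # Sort-free O(n^2) algorithm: for each dimension, scan for its immediate
--   # predecessor in the descending-stride order (ties broken by index) and emit
--   # the stride ratio directly; the unique dimension with no predecessor gets the
--   # shape of the order's overall last dimension.
--   n = len(strides)
--   def before(j, i):
--     # j comes strictly before i in the descending stable order
--     return strides[j] > strides[i] or (strides[j] == strides[i] and j < i)
--   last = 0
--   for j in range(1, n):
--     if before(last, j):
--       last = j
--   res = []
--   for i in range(n):
--     pred = None
--     for j in range(n):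
--       if before(j, i) and (pred is None or before(pred, j)):
--         pred = j
--     if pred is None:
--       res.append(shape[last])
--     else:
--       res.append(strides[pred] // strides[i])
--   return res
-- ===== Notes on version B (the rewrite author's own statement) =====
-- stated objective: alternative
-- what changed: B removes the sort and the permutation bookkeeping entirely: for each dimension it scans all dimensions for its immediate predecessor in the descending-stride order (ties by index) and emits the stride ratio directly, the unique predecessor-free dimension getting the shape of the order-maximum found by a separate linear scan; O(n^2) comparisons instead of sort + gather + inverse permutation + gather.
import Mathlib
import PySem

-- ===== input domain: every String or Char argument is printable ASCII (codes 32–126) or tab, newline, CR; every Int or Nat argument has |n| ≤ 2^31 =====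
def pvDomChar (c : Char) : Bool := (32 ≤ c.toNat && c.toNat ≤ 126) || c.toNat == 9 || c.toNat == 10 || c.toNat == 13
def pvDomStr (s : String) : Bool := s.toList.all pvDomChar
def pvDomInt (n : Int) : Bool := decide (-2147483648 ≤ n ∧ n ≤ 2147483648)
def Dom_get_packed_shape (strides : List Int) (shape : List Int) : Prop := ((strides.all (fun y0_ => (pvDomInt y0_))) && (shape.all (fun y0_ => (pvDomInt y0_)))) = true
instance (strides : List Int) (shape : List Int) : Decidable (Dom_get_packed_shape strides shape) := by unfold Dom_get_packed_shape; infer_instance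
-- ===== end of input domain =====

-- B drops A's sort/gather/inverse-permutation pipeline: each dimension finds its immediate
-- predecessor in the descending-stride order by a direct scan (O(n^2), no sorting at all).

-- ===== PORT A =====
def get_packed_shape (strides : List Int) (shape : List Int) : List Int :=
  let perm := PySem.List.sorted (PySem.List.pyRange 0 (strides.length : Int) 1)
    (fun i => PySem.List.pyGetD strides i 0) true
  let ordered_strides := perm.map (fun i => PySem.List.pyGetD strides i 0)
  let ordered_shape := perm.map (fun i => PySem.List.pyGetD shape i 0)
  -- packed_shape = [ordered_shape[-1]] + [s0 // s for s0, s in zip(os, os[1:])]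
  let packed_shape := [PySem.List.pyGetD ordered_shape (-1) 0] ++
    (ordered_strides.zip (PySem.List.slice ordered_strides (some 1) none)).map
      (fun t => PySem.Int.floordiv t.1 t.2)
  -- inv_perm = [None]*len(perm); for i, p in enumerate(perm): inv_perm[p] = i
  -- (p is always a non-negative in-range index here, so .toNat/List.set is exact)
  let inv_perm := (PySem.List.enumerate perm 0).foldl
    (fun acc t => acc.set t.2.toNat t.1) (List.replicate perm.length (0 : Int))
  inv_perm.map (fun i => PySem.List.pyGetD packed_shape i 0)

-- ===== PORT B =====
-- strides[j], as B's `before` closure reads it (indices are in range throughout)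
def pvKey (strides : List Int) (i : Int) : Int := PySem.List.pyGetD strides i 0

-- before(j, i): j comes strictly before i in the descending stable order
def pvBefore (strides : List Int) (j i : Int) : Bool :=
  decide (pvKey strides i < pvKey strides j) ||
  (decide (pvKey strides j = pvKey strides i) && decide (j < i))

-- the body of B's outer loop for one index i: scan all j for i's immediate predecessor,
-- then emit shape[last] (no predecessor) or the stride ratio
def pvEntry (strides shape : List Int) (n last i : Int) : Int :=
  let pred := (PySem.List.pyRange 0 n).foldl
    (fun (pred : Option Int) j =>
      if pvBefore strides j i &&
          (match pred with
           | none => true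
           | some p => pvBefore strides p j) then some j else pred) none
  match pred with
  | none => PySem.List.pyGetD shape last 0
  | some p => PySem.Int.floordiv (pvKey strides p) (pvKey strides i)

def get_packed_shape_alt (strides : List Int) (shape : List Int) : List Int :=
  let n : Int := strides.length
  -- last = 0; for j in range(1, n): if before(last, j): last = j
  let last := (PySem.List.pyRange 1 n).foldl
    (fun last j => if pvBefore strides last j then j else last) 0
  -- res = []; for i in range(n): res.append(<entry for i>)
  (PySem.List.pyRange 0 n).foldl
    (fun res i => res ++ [pvEntry strides shape n last i]) []

-- ===== PRECONDITION & SPEC =====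
-- Pre_ excludes exactly the inputs where A raises: empty strides (IndexError), shape shorter
-- than strides (IndexError), and stride lists in which a zero stride is not the unique maximum
-- (ZeroDivisionError in the adjacent-stride ratio).
def Pre_get_packed_shape (strides : List Int) (shape : List Int) : Prop :=
  strides ≠ [] ∧ strides.length ≤ shape.length ∧
    strides.count 0 ≤ 1 ∧ ((0 : Int) ∈ strides → ∀ s ∈ strides, s ≤ 0)
instance (strides : List Int) (shape : List Int) : Decidable (Pre_get_packed_shape strides shape) := by
  unfold Pre_get_packed_shape; infer_instance

def pvWitness_get_packed_shape : List Int × List Int := ([4, 12, 1], [3, 2, 4])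

def Spec_get_packed_shape (strides : List Int) (shape : List Int) (out : List Int) : Prop :=
  out = get_packed_shape_alt strides shape
instance (strides : List Int) (shape : List Int) (out : List Int) : Decidable (Spec_get_packed_shape strides shape out) := by
  unfold Spec_get_packed_shape; infer_instance

-- ===== CLAIM (what is proved, stated in full; the proofs are below) =====
def Claim_equal_get_packed_shape : Prop := ∀ (strides : List Int) (shape : List Int), Dom_get_packed_shape strides shape → Pre_get_packed_shape strides shape → Spec_get_packed_shape strides shape (get_packed_shape strides shape)

-- ===== LEMMAS AND PROOFS =====

-- the strict total order behind B's `before`: descending stride, ties by index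
def pvR (strides : List Int) (j i : Int) : Prop :=
  pvKey strides i < pvKey strides j ∨ (pvKey strides j = pvKey strides i ∧ j < i)

theorem pvBefore_iff (strides : List Int) (j i : Int) :
    pvBefore strides j i = true ↔ pvR strides j i := by
  simp [pvBefore, pvR]

theorem pvR_trans {strides : List Int} {a b c : Int}
    (h1 : pvR strides a b) (h2 : pvR strides b c) : pvR strides a c := by
  rcases h1 with h1 | ⟨h1, h1'⟩ <;> rcases h2 with h2 | ⟨h2, h2'⟩ <;>
    unfold pvR <;> [skip; skip; skip; skip] <;> first
    | exact Or.inl (by omega)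
    | exact Or.inr ⟨by omega, by omega⟩

theorem pvR_irrefl (strides : List Int) (a : Int) : ¬ pvR strides a a := by
  unfold pvR; omega

theorem pvR_asymm {strides : List Int} {a b : Int}
    (h : pvR strides a b) : ¬ pvR strides b a := by
  unfold pvR at *; omega

theorem pvR_total (strides : List Int) (a b : Int) :
    a = b ∨ pvR strides a b ∨ pvR strides b a := by
  unfold pvR
  rcases lt_trichotomy a b with h | h | h <;> rcases lt_trichotomy (pvKey strides a) (pvKey strides b) with hk | hk | hk <;> omega

-- stable insertion preserves Pairwise pvR when the new element is index-newest
theorem pv_insert_pairwise (strides : List Int) (x : Int) (ys : List Int)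
    (h : ys.Pairwise (pvR strides)) (hx : ∀ y ∈ ys, y < x) :
    (PySem.List.insertBy
      (fun a b => decide (pvKey strides b < pvKey strides a)) x ys).Pairwise (pvR strides) := by
  induction ys with
  | nil => simp [PySem.List.insertBy]
  | cons y ys ih =>
      rw [List.pairwise_cons] at h
      simp only [PySem.List.insertBy]
      by_cases hc : (decide (pvKey strides y < pvKey strides x)) = true
      · simp only [hc, if_true]
        refine List.Pairwise.cons ?_ (List.Pairwise.cons h.1 h.2)
        intro z hz
        have hyx : pvKey strides y < pvKey strides x := of_decide_eq_true hc
        rcases List.mem_cons.1 hz with rfl | hz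
        · exact Or.inl hyx
        · have hz' := h.1 z hz
          unfold pvR at hz' ⊢
          omega
      · simp only [hc]
        refine List.Pairwise.cons ?_ (ih h.2 (fun z hz => hx z (List.mem_cons_of_mem _ hz)))
        intro z hz
        rcases (PySem.List.mem_insertBy _ _ _ _).1 hz with rfl | hz
        · have hyx : ¬ pvKey strides y < pvKey strides z := by
            intro hlt; exact hc (decide_eq_true hlt)
          have hzy : y < z := hx y (List.mem_cons_self)
          unfold pvR
          omega
        · exact h.1 z hz

theorem pv_foldl_insert_pairwise (strides : List Int) (L : List Int) :
    ∀ (acc : List Int), acc.Pairwise (pvR strides) →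
    (∀ y ∈ acc, ∀ z ∈ L, y < z) → L.Pairwise (· < ·) →
    (L.foldl (fun acc x => PySem.List.insertBy
        (fun a b => decide (pvKey strides b < pvKey strides a)) x acc) acc).Pairwise (pvR strides) := by
  induction L with
  | nil => intro acc hacc _ _; exact hacc
  | cons x L ih =>
      intro acc hacc hlt hL
      rw [List.pairwise_cons] at hL
      refine ih _ (pv_insert_pairwise strides x acc hacc
        (fun y hy => hlt y hy x (List.mem_cons_self))) ?_ hL.2
      intro y hy z hz
      rcases (PySem.List.mem_insertBy _ _ _ _).1 hy with rfl | hy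
      · exact hL.1 z hz
      · exact hlt y hy z (List.mem_cons_of_mem _ hz)

theorem pv_range_pairwise_lt (a b : Int) :
    (PySem.List.pyRange a b).Pairwise (· < ·) := by
  rw [List.pairwise_iff_getElem]
  intro p q hp hq hpq
  rw [PySem.List.getElem_pyRange_one, PySem.List.getElem_pyRange_one]
  omega

theorem pv_perm_pairwise (strides : List Int) :
    (PySem.List.sorted (PySem.List.pyRange 0 (strides.length : Int))
      (fun i => PySem.List.pyGetD strides i 0) true).Pairwise (pvR strides) := by
  rw [PySem.List.sorted_rev_eq_foldl_insertBy]
  exact pv_foldl_insert_pairwise strides _ [] List.Pairwise.nil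
    (by intro y hy; simp at hy) (pv_range_pairwise_lt _ _)

-- B's `last` scan computes an element m with (m = a ∨ m ∈ L) that every other candidate pvR-precedes
theorem pv_maxfold (strides : List Int) (L : List Int) (a : Int) :
    (L.foldl (fun last j => if pvBefore strides last j then j else last) a = a ∨
      L.foldl (fun last j => if pvBefore strides last j then j else last) a ∈ L) ∧
    ∀ k, (k = a ∨ k ∈ L) →
      k = L.foldl (fun last j => if pvBefore strides last j then j else last) a ∨
      pvR strides k (L.foldl (fun last j => if pvBefore strides last j then j else last) a) := by
  induction L generalizing a with
  | nil =>
      refine ⟨Or.inl rfl, ?_⟩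
      intro k hk
      rcases hk with rfl | hk
      · exact Or.inl rfl
      · simp at hk
  | cons j L ih =>
      by_cases hb : pvBefore strides a j = true
      · simp only [List.foldl_cons, hb, if_true]
        obtain ⟨ih1, ih2⟩ := ih j
        have hRaj : pvR strides a j := (pvBefore_iff _ _ _).1 hb
        refine ⟨?_, ?_⟩
        · rcases ih1 with h | h
          · exact Or.inr (by rw [h]; exact List.mem_cons_self)
          · exact Or.inr (List.mem_cons_of_mem _ h)
        · intro k hk
          rcases hk with rfl | hk
          · rcases ih2 j (Or.inl rfl) with h | h
            · exact Or.inr (h ▸ hRaj)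
            · exact Or.inr (pvR_trans hRaj h)
          · rcases List.mem_cons.1 hk with rfl | hk
            · exact ih2 k (Or.inl rfl)
            · exact ih2 k (Or.inr hk)
      · simp only [List.foldl_cons, hb]
        have hb' : ¬ pvR strides a j := fun h => hb ((pvBefore_iff _ _ _).2 h)
        obtain ⟨ih1, ih2⟩ := ih a
        refine ⟨?_, ?_⟩
        · rcases ih1 with h | h
          · exact Or.inl h
          · exact Or.inr (List.mem_cons_of_mem _ h)
        · intro k hk
          rcases hk with rfl | hk
          · exact ih2 k (Or.inl rfl)
          · rcases List.mem_cons.1 hk with rfl | hk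
            · rcases pvR_total strides k a with heq | h | h
              · rw [heq]; exact ih2 a (Or.inl rfl)
              · rcases ih2 a (Or.inl rfl) with h2 | h2
                · exact Or.inr (h2 ▸ h)
                · exact Or.inr (pvR_trans h h2)
              · exact absurd h hb'
            · exact ih2 k (Or.inr hk)

-- B's `pred` scan: spec of the fold result relative to a set of candidates
def pvPsetOk (strides : List Int) (i : Int) (o : Option Int) (S : Int → Prop) : Prop :=
  match o with
  | none => ∀ k, S k → ¬ pvR strides k i
  | some m => S m ∧ pvR strides m i ∧ ∀ k, S k → pvR strides k i → k = m ∨ pvR strides k m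

theorem pvPsetOk_congr (strides : List Int) (i : Int) (o : Option Int) (S S' : Int → Prop)
    (hS : ∀ k, S k ↔ S' k) (h : pvPsetOk strides i o S) : pvPsetOk strides i o S' := by
  cases o with
  | none => exact fun k hk => h k ((hS k).2 hk)
  | some m =>
      obtain ⟨h1, h2, h3⟩ := h
      exact ⟨(hS m).1 h1, h2, fun k hk => h3 k ((hS k).2 hk)⟩

theorem pv_predstep (strides : List Int) (i j : Int) (acc : Option Int) (S : Int → Prop) :
    pvPsetOk strides i acc S →
    pvPsetOk strides i
      (if pvBefore strides j i &&
          (match acc with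
           | none => true
           | some p => pvBefore strides p j) then some j else acc)
      (fun k => S k ∨ k = j) := by
  intro h
  cases acc with
  | none =>
      by_cases h1 : pvBefore strides j i = true
      · simp only [h1, Bool.true_and, if_true]
        refine ⟨Or.inr rfl, (pvBefore_iff _ _ _).1 h1, ?_⟩
        intro k hk hki
        rcases hk with hk | rfl
        · exact absurd hki (h k hk)
        · exact Or.inl rfl
      · simp only [h1, Bool.false_and]
        intro k hk
        rcases hk with hk | rfl
        · exact h k hk
        · exact fun hki => h1 ((pvBefore_iff _ _ _).2 hki)
  | some m =>
      obtain ⟨hSm, hRmi, hmax⟩ := h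
      by_cases h1 : pvBefore strides j i = true
      · by_cases h2 : pvBefore strides m j = true
        · simp only [h1, h2, Bool.true_and, if_true]
          have hRmj : pvR strides m j := (pvBefore_iff _ _ _).1 h2
          refine ⟨Or.inr rfl, (pvBefore_iff _ _ _).1 h1, ?_⟩
          intro k hk hki
          rcases hk with hk | rfl
          · rcases hmax k hk hki with rfl | h3
            · exact Or.inr hRmj
            · exact Or.inr (pvR_trans h3 hRmj)
          · exact Or.inl rfl
        · simp only [h1, h2, Bool.true_and]
          have hnRmj : ¬ pvR strides m j := fun h3 => h2 ((pvBefore_iff _ _ _).2 h3)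
          refine ⟨Or.inl hSm, hRmi, ?_⟩
          intro k hk hki
          rcases hk with hk | rfl
          · exact hmax k hk hki
          · rcases pvR_total strides k m with rfl | h3 | h3
            · exact Or.inl rfl
            · exact Or.inr h3
            · exact absurd h3 hnRmj
      · simp only [h1, Bool.false_and]
        refine ⟨Or.inl hSm, hRmi, ?_⟩
        intro k hk hki
        rcases hk with hk | rfl
        · exact hmax k hk hki
        · exact absurd ((pvBefore_iff _ _ _).2 hki) (by simpa using h1)

theorem pv_predfold (strides : List Int) (i : Int) (L : List Int) :
    ∀ (acc : Option Int) (S : Int → Prop), pvPsetOk strides i acc S →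
      pvPsetOk strides i
        (L.foldl (fun (pred : Option Int) j =>
          if pvBefore strides j i &&
              (match pred with
               | none => true
               | some p => pvBefore strides p j) then some j else pred) acc)
        (fun k => S k ∨ k ∈ L) := by
  induction L with
  | nil =>
      intro acc S h
      exact pvPsetOk_congr strides i acc S _ (by simp) h
  | cons j L ih =>
      intro acc S h
      simp only [List.foldl_cons]
      refine pvPsetOk_congr strides i _ (fun k => (S k ∨ k = j) ∨ k ∈ L) _ ?_
        (ih _ _ (pv_predstep strides i j acc S h))
      intro k
      simp [or_assoc, List.mem_cons]

-- scatter (foldl of List.set over (position, value) pairs): length, untouched and hit cells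
theorem pv_scatter_length (L : List (Nat × Int)) (init : List Int) :
    (L.foldl (fun (a : List Int) t => a.set t.1 t.2) init).length = init.length := by
  induction L generalizing init with
  | nil => rfl
  | cons t L ih => simpa using ih (init.set t.1 t.2)

theorem pv_scatter_getElem?_of_notmem (L : List (Nat × Int)) (init : List Int) (q : Nat)
    (h : ∀ t ∈ L, t.1 ≠ q) :
    (L.foldl (fun (a : List Int) t => a.set t.1 t.2) init)[q]? = init[q]? := by
  induction L generalizing init with
  | nil => rfl
  | cons t L ih =>
      simp only [List.foldl_cons]
      rw [ih _ (fun u hu => h u (List.mem_cons_of_mem _ hu))]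
      exact List.getElem?_set_ne (h t (List.mem_cons_self))

theorem pv_scatter_getElem?_of_mem (L : List (Nat × Int)) :
    ∀ (init : List Int), (L.map Prod.fst).Nodup → ∀ (j : Nat) (hj : j < L.length),
      L[j].1 < init.length →
      (L.foldl (fun (a : List Int) t => a.set t.1 t.2) init)[L[j].1]? = some L[j].2 := by
  induction L with
  | nil => intro init _ j hj; exact absurd hj (by simp)
  | cons t L ih =>
      intro init hnd j hj hb
      simp only [List.map_cons, List.nodup_cons] at hnd
      match j with
      | 0 =>
          simp only [List.getElem_cons_zero] at hb ⊢
          simp only [List.foldl_cons]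
          rw [pv_scatter_getElem?_of_notmem L _ t.1
            (fun u hu h => hnd.1 (h ▸ List.mem_map_of_mem hu))]
          simp [hb]
      | j + 1 =>
          simp only [List.getElem_cons_succ] at hb ⊢
          simp only [List.foldl_cons]
          exact ih _ hnd.2 j (by simpa using hj) (by simpa using hb)

theorem pv_inv_foldl (P : List Int) (init : List Int) :
    (PySem.List.enumerate P 0).foldl (fun (acc : List Int) t => acc.set t.2.toNat t.1) init
      = ((PySem.List.enumerate P 0).map (fun t => (t.2.toNat, t.1))).foldl
          (fun (a : List Int) t => a.set t.1 t.2) init := by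
  rw [List.foldl_map]

-- ===== VERDICT (by name: the statement is the Claim_ definition above) =====
theorem get_packed_shape_spec : Claim_equal_get_packed_shape := by
  intro strides shape _hdom hpre
  obtain ⟨hne, hlen, -, -⟩ := hpre
  unfold Spec_get_packed_shape
  rw [get_packed_shape, get_packed_shape_alt]
  set perm := PySem.List.sorted (PySem.List.pyRange 0 (strides.length : Int))
    (fun i => PySem.List.pyGetD strides i 0) true with hpermdef
  have hnpos : 0 < strides.length := List.length_pos_of_ne_nil hne
  -- basic facts about perm
  have hpermR : perm.Perm (PySem.List.pyRange 0 (strides.length : Int)) :=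
    PySem.List.sorted_perm _ _ true
  have hplen : perm.length = strides.length := by
    rw [hpermR.length_eq, PySem.List.length_pyRange_one]; omega
  have hnodup : perm.Nodup := hpermR.nodup_iff.2 (PySem.List.nodup_pyRange_one _ _)
  have hpair : perm.Pairwise (pvR strides) := pv_perm_pairwise strides
  have hpairE := List.pairwise_iff_getElem.1 hpair
  have hmemrange : ∀ x ∈ perm, x ∈ PySem.List.pyRange 0 (strides.length : Int) :=
    fun x hx => hpermR.mem_iff.1 hx
  have hmem : ∀ x ∈ perm, 0 ≤ x ∧ x < (strides.length : Int) :=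
    fun x hx => PySem.List.mem_pyRange_one.1 (hmemrange x hx)
  have hsur : ∀ q : Nat, q < strides.length →
      ∃ j : Nat, ∃ hj : j < perm.length, perm[j] = (q : Int) := by
    intro q hq
    have : (q : Int) ∈ perm :=
      hpermR.mem_iff.2 (PySem.List.mem_pyRange_one.2 ⟨by omega, by omega⟩)
    obtain ⟨j, hj, hpj⟩ := List.mem_iff_getElem.1 this
    exact ⟨j, hj, hpj⟩
  have hpne : perm ≠ [] := by
    intro h; rw [h] at hplen; simp at hplen; omega
  -- B's `last` scan finds the last element of perm
  set lastB := (PySem.List.pyRange 1 (strides.length : Int)).foldl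
    (fun last j => if pvBefore strides last j then j else last) 0 with hlbdef
  have hlast : lastB = perm.getLast hpne := by
    obtain ⟨hm1, hm2⟩ := pv_maxfold strides (PySem.List.pyRange 1 (strides.length : Int)) 0
    have hlbmem : lastB ∈ PySem.List.pyRange 0 (strides.length : Int) := by
      rcases hm1 with h | h
      · rw [hlbdef, h]
        exact PySem.List.mem_pyRange_one.2 ⟨le_refl 0, by exact_mod_cast hnpos⟩
      · have := PySem.List.mem_pyRange_one.1 h
        exact PySem.List.mem_pyRange_one.2 ⟨by omega, by omega⟩
    have hcand : ∀ k ∈ PySem.List.pyRange 0 (strides.length : Int),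
        k = lastB ∨ pvR strides k lastB := by
      intro k hk
      have hk' := PySem.List.mem_pyRange_one.1 hk
      by_cases h0 : k = 0
      · exact hm2 k (Or.inl h0)
      · exact hm2 k (Or.inr (PySem.List.mem_pyRange_one.2 ⟨by omega, hk'.2⟩))
    have hglmem : perm.getLast hpne ∈ perm := List.getLast_mem hpne
    rcases hcand (perm.getLast hpne) (hmemrange _ hglmem) with h | h
    · exact h.symm
    · exfalso
      obtain ⟨t, ht, hpt⟩ := List.mem_iff_getElem.1 (hpermR.mem_iff.2 hlbmem)
      by_cases htl : t = perm.length - 1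
      · subst htl
        have heq : lastB = perm.getLast hpne := by
          rw [List.getLast_eq_getElem]; exact hpt.symm
        exact pvR_irrefl strides _ (heq ▸ h)
      · have h2 : pvR strides lastB (perm.getLast hpne) := by
          rw [List.getLast_eq_getElem, ← hpt]
          exact hpairE t (perm.length - 1) ht (by omega) (by omega)
        exact pvR_asymm h h2
  -- B's `pred` scan at i = perm[j]
  have hfold : ∀ i : Int, pvPsetOk strides i
      ((PySem.List.pyRange 0 (strides.length : Int)).foldl
        (fun (pred : Option Int) j =>
          if pvBefore strides j i &&
              (match pred with
               | none => true
               | some p => pvBefore strides p j) then some j else pred) none)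
      (fun k => k ∈ PySem.List.pyRange 0 (strides.length : Int)) := by
    intro i
    refine pvPsetOk_congr strides i _ _ _ (by intro k; simp)
      (pv_predfold strides i _ none (fun _ => False) ?_)
    intro k hk
    exact hk.elim
  have hpred0 : ∀ (h0 : 0 < perm.length),
      pvEntry strides shape (strides.length : Int) lastB perm[0] =
        PySem.List.pyGetD shape (perm.getLast hpne) 0 := by
    intro h0
    rw [pvEntry]
    have hspec := hfold perm[0]
    cases hE : (PySem.List.pyRange 0 (strides.length : Int)).foldl
        (fun (pred : Option Int) j =>
          if pvBefore strides j perm[0] &&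
              (match pred with
               | none => true
               | some p => pvBefore strides p j) then some j else pred) none with
    | none => simp only [hlast]
    | some m =>
        exfalso
        rw [hE] at hspec
        obtain ⟨hmR, hRmi, -⟩ := hspec
        obtain ⟨t, ht, hpt⟩ := List.mem_iff_getElem.1 (hpermR.mem_iff.2 hmR)
        rcases Nat.eq_zero_or_pos t with rfl | htpos
        · exact pvR_irrefl strides _ (hpt ▸ hRmi)
        · exact pvR_asymm hRmi (hpt ▸ hpairE 0 t h0 ht htpos)
  have hpredS : ∀ (t : Nat) (ht : t + 1 < perm.length),
      pvEntry strides shape (strides.length : Int) lastB perm[t + 1] =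
        PySem.Int.floordiv (PySem.List.pyGetD strides perm[t] 0)
          (PySem.List.pyGetD strides perm[t + 1] 0) := by
    intro t ht
    rw [pvEntry]
    have hspec := hfold perm[t + 1]
    have hRt : pvR strides perm[t] perm[t + 1] :=
      hpairE t (t + 1) (by omega) ht (by omega)
    cases hE : (PySem.List.pyRange 0 (strides.length : Int)).foldl
        (fun (pred : Option Int) j =>
          if pvBefore strides j perm[t + 1] &&
              (match pred with
               | none => true
               | some p => pvBefore strides p j) then some j else pred) none with
    | none =>
        exfalso
        rw [hE] at hspec
        exact hspec perm[t] (hmemrange _ (List.getElem_mem _)) hRt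
    | some m =>
        rw [hE] at hspec
        obtain ⟨hmR, hRmi, hmax⟩ := hspec
        have hmeq : m = perm[t] := by
          obtain ⟨s, hs, hps⟩ := List.mem_iff_getElem.1 (hpermR.mem_iff.2 hmR)
          rcases lt_trichotomy s (t + 1) with hst | hst | hst
          · rcases hmax perm[t] (hmemrange _ (List.getElem_mem _)) hRt with h | h
            · exact h.symm
            · by_cases hseq : s = t
              · subst hseq
                exact hps.symm
              · exfalso
                exact pvR_asymm h (hps ▸ hpairE s t hs (by omega) (by omega))
          · exfalso
            subst hst
            rw [← hps] at hRmi
            exact pvR_irrefl strides _ hRmi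
          · exfalso
            exact pvR_asymm hRmi (hps ▸ hpairE (t + 1) s ht hs hst)
        simp only [hmeq, pvKey]
  -- rewrite B's outer loop as a map
  rw [PySem.List.foldl_append_singleton_eq_map, List.nil_append]
  -- name A's intermediate lists
  set os := perm.map (fun i => PySem.List.pyGetD strides i 0) with hosdef
  set oshape := perm.map (fun i => PySem.List.pyGetD shape i 0) with hoshdef
  set packed := [PySem.List.pyGetD oshape (-1) 0] ++
    (os.zip (PySem.List.slice os (some 1) none)).map
      (fun t => PySem.Int.floordiv t.1 t.2) with hpackeddef
  have hoslen : os.length = strides.length := by rw [hosdef, List.length_map, hplen]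
  have hziplen : (os.zip (PySem.List.slice os (some 1) none)).length = strides.length - 1 := by
    rw [PySem.List.slice_from _ (by norm_num)]
    simp [hoslen]
  have hpackedlen : packed.length = strides.length := by
    rw [hpackeddef, List.length_append, List.length_map, hziplen]
    simp; omega
  have hpacked0 : PySem.List.pyGetD oshape (-1) 0 =
      PySem.List.pyGetD shape (perm.getLast hpne) 0 := by
    rw [hoshdef, PySem.List.pyGetD, PySem.List.pyGet?_neg_one, List.getLast?_map,
      List.getLast?_eq_some_getLast hpne]
    rfl
  have hpacked0' : packed[0]? = some (PySem.List.pyGetD shape (perm.getLast hpne) 0) := by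
    rw [hpackeddef]
    simp [hpacked0]
  have hpackedS : ∀ (t : Nat) (ht : t + 1 < strides.length),
      packed[t + 1]? =
        some (PySem.Int.floordiv (PySem.List.pyGetD strides (perm[t]'(by omega) : Int) 0)
          (PySem.List.pyGetD strides (perm[t + 1]'(by omega) : Int) 0)) := by
    intro t ht
    have ha : os[t]? = some (PySem.List.pyGetD strides (perm[t]'(by omega) : Int) 0) := by
      rw [hosdef, List.getElem?_map, List.getElem?_eq_getElem (by rw [hplen]; omega)]
      rfl
    have hb : (PySem.List.slice os (some 1) none)[t]? =
        some (PySem.List.pyGetD strides (perm[t + 1]'(by omega) : Int) 0) := by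
      rw [PySem.List.slice_from _ (by norm_num), show ((1 : Int).toNat) = 1 from rfl,
        List.getElem?_drop, show 1 + t = t + 1 from by omega, hosdef, List.getElem?_map,
        List.getElem?_eq_getElem (by rw [hplen]; omega)]
      rfl
    rw [hpackeddef, List.getElem?_append_right (by simp),
      show t + 1 - [PySem.List.pyGetD oshape (-1) 0].length = t from by simp,
      List.getElem?_map, List.zip_eq_zipWith, List.getElem?_zipWith, ha, hb]
    rfl
  -- inv_perm, elementwise
  set invp := (PySem.List.enumerate perm 0).foldl
    (fun acc t => acc.set t.2.toNat t.1) (List.replicate perm.length (0 : Int)) with hinvdef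
  have hinvlen : invp.length = strides.length := by
    rw [hinvdef, pv_inv_foldl, pv_scatter_length, List.length_replicate, hplen]
  have hmapfstnd : (((PySem.List.enumerate perm 0).map
      (fun t => (t.2.toNat, t.1))).map Prod.fst).Nodup := by
    have hLA : ((PySem.List.enumerate perm 0).map (fun t => (t.2.toNat, t.1))).map Prod.fst
        = perm.map Int.toNat := by
      simp only [List.map_map]
      have : ((fun t : Nat × Int => t.1) ∘ fun t : Int × Int => (t.2.toNat, t.1))
          = (Int.toNat ∘ fun t : Int × Int => t.2) := rfl
      rw [this, ← List.map_map, PySem.List.map_snd_enumerate]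
    rw [hLA]
    exact hnodup.map_on (fun x hx y hy hxy => by
      have h1 := hmem x hx; have h2 := hmem y hy; omega)
  have hinv_at : ∀ (q : Nat) (j : Nat) (hj : j < perm.length), perm[j] = (q : Int) →
      invp[q]? = some (j : Int) := by
    intro q j hj hpj
    have hq : q < strides.length := by
      have := hmem _ (List.getElem_mem hj)
      rw [hpj] at this
      exact_mod_cast this.2
    rw [hinvdef, pv_inv_foldl]
    have hL := pv_scatter_getElem?_of_mem
      ((PySem.List.enumerate perm 0).map (fun t => (t.2.toNat, t.1)))
      (List.replicate perm.length (0 : Int)) hmapfstnd j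
      (by simp [PySem.List.length_enumerate, hj])
      (by simp [PySem.List.getElem_enumerate, hpj, hplen, hq])
    simp only [List.getElem_map, PySem.List.getElem_enumerate, zero_add, hpj] at hL
    simpa using hL
  -- final elementwise comparison
  apply List.ext_getElem?
  intro q
  by_cases hq : q < strides.length
  · obtain ⟨j, hj, hpj⟩ := hsur q hq
    rw [List.getElem?_map, hinv_at q j hj hpj]
    have hqrange : q < (PySem.List.pyRange 0 (strides.length : Int)).length := by
      rw [PySem.List.length_pyRange_one]; omega
    rw [List.getElem?_map, List.getElem?_eq_getElem hqrange]
    rw [PySem.List.getElem_pyRange_one]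
    simp only [zero_add, Option.map_some]
    rw [← hpj]
    cases j with
    | zero =>
        rw [hpred0 hj, PySem.List.pyGetD_natCast, List.getD_eq_getElem?_getD, hpacked0']
        rfl
    | succ t =>
        rw [hpredS t hj, PySem.List.pyGetD_natCast, List.getD_eq_getElem?_getD,
          hpackedS t (by omega)]
        rfl
  · rw [List.getElem?_eq_none, List.getElem?_eq_none]
    · rw [List.length_map, PySem.List.length_pyRange_one]; omega
    · rw [List.length_map, hinvlen]; omega
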